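-- pv_equiv track=rewrite | github.com/cyrozap/phb-utils | explain-eeh.py | extract_bit_field_be
-- ===== SOURCE A (Python) =====
-- def extract_bit_field_be(data, offset, length):
--     '''Extract big-endian bits (MSB is 0)'''
--     bits = 0
--     bit_count = len(data)*8//2
--     number = int(data, 16)
--     for i in range(bit_count):
--         if i not in range(offset, offset+length):
--             continue
--         bit_set = number & (1 << (bit_count - 1 - i))
--         if bit_set:
--             bits |= (1 << (offset + length - 1 - i))
--
--     return bits
-- ===== SOURCE B (Python) =====
-- def extract_bit_field_be(data, offset, length):
--     '''Extract big-endian bits (MSB is 0)'''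
--     bit_count = len(data) * 4
--     # the data is a bit string: take its value as an unsigned bit_count-bit integer
--     number = int(data, 16) & ((1 << bit_count) - 1)
--     if length <= 0:
--         return 0
--     shift = bit_count - (offset + length)
--     field = number >> shift if shift >= 0 else number << -shift
--     return field & ((1 << length) - 1)
-- ===== Notes on version B (the rewrite author's own statement) =====
-- stated objective: faster
-- what changed: A scans every bit position of the parsed number with one bigint mask/shift/or per bit; B takes the data's unsigned bit-vector value once and extracts the field with a single shift (right, or left when the window runs past the data) and one mask; Pre_ excludes only strings int(data,16) rejects (ValueError).
import Mathlib
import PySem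

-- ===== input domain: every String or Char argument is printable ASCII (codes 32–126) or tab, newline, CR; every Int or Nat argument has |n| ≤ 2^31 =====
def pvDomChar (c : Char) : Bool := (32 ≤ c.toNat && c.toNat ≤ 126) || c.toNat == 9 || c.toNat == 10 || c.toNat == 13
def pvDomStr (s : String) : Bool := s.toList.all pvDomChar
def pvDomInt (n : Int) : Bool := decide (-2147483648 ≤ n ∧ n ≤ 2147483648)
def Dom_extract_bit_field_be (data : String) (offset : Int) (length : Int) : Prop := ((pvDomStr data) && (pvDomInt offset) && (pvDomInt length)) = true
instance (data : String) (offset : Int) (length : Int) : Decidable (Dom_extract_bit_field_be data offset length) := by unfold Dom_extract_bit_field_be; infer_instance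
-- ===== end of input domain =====

-- B replaces A's per-bit loop (one bigint mask/or per bit) by a single
-- shift-and-mask extraction of the field from the data's unsigned value; objective: faster.


-- ===== PORT A =====
-- 'i not in range(offset, offset+length)' is ¬(offset ≤ i ∧ i < offset+length) (step-1 range membership);
-- '1 << k' is (1:Int) <<< k.toNat — exact here because at every use the exponent is nonnegative
-- (i < bit_count resp. i < offset+length); 'if bit_set:' is Python int truthiness, bit_set ≠ 0.
def extract_bit_field_be (data : String) (offset : Int) (length : Int) : Int :=
  let bit_count : Int := PySem.Int.floordiv (PySem.Str.len data * 8) 2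
  match PySem.Int.ofStrBase? data 16 with
  | none => 0  -- int(data, 16) raises ValueError here: excluded by Pre_
  | some number =>
    (PySem.List.pyRange 0 bit_count 1).foldl (fun bits i =>
      if ¬ (offset ≤ i ∧ i < offset + length) then bits
      else
        let bit_set : Int := PySem.Int.band number ((1 : Int) <<< (bit_count - 1 - i).toNat)
        if bit_set ≠ 0 then
          PySem.Int.bor bits ((1 : Int) <<< (offset + length - 1 - i).toNat)
        else bits) 0

-- ===== PORT B =====
-- Source B: bit_count = len(data)*4; number = int(data,16) & ((1 << bit_count) - 1);
-- 0 if length <= 0, else (number >> shift if shift >= 0 else number << -shift) & ((1 << length) - 1)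
-- with shift = bit_count - (offset + length).  '>>'/'<<' are Lean's '>>> / <<<' on Int (arithmetic
-- shift, exact for Python); every '.toNat' exponent is taken where the Int is nonnegative.
def extract_bit_field_be_alt (data : String) (offset : Int) (length : Int) : Int :=
  let bit_count : Int := PySem.Str.len data * 4
  match PySem.Int.ofStrBase? data 16 with
  | none => 0  -- int(data, 16) raises ValueError here: excluded by Pre_
  | some v =>
    let number : Int := PySem.Int.band v (((1 : Int) <<< bit_count.toNat) - 1)
    if length ≤ 0 then 0
    else
      let shift : Int := bit_count - (offset + length)
      let field : Int := if 0 ≤ shift then number >>> shift.toNat else number <<< (-shift).toNat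
      PySem.Int.band field (((1 : Int) <<< length.toNat) - 1)

-- ===== PRECONDITION & SPEC =====
-- Pre_: int(data, 16) parses (otherwise A raises ValueError).
def Pre_extract_bit_field_be (data : String) (offset : Int) (length : Int) : Prop :=
  (PySem.Int.ofStrBase? data 16).isSome = true
instance (data : String) (offset : Int) (length : Int) : Decidable (Pre_extract_bit_field_be data offset length) := by unfold Pre_extract_bit_field_be; infer_instance

def pvWitness_extract_bit_field_be : String × Int × Int := ("ff", 2, 4)

def Spec_extract_bit_field_be (data : String) (offset : Int) (length : Int) (out : Int) : Prop := out = extract_bit_field_be_alt data offset length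
instance (data : String) (offset : Int) (length : Int) (out : Int) : Decidable (Spec_extract_bit_field_be data offset length out) := by unfold Spec_extract_bit_field_be; infer_instance

-- ===== CLAIM (what is proved, stated in full; the proofs are below) =====
def Claim_equal_extract_bit_field_be : Prop := ∀ (data : String) (offset : Int) (length : Int), Dom_extract_bit_field_be data offset length → Pre_extract_bit_field_be data offset length → Spec_extract_bit_field_be data offset length (extract_bit_field_be data offset length)

-- ===== LEMMAS AND PROOFS =====

-- The i-th summand of A's loop (i as a Nat), and the partial sums of the loop.
def pvTerm (number : Int) (N : Nat) (offset length : Int) (i : Nat) : Int :=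
  if offset ≤ (i : Int) ∧ (i : Int) < offset + length then
    (number / 2 ^ (N - 1 - i) % 2) * 2 ^ ((offset + length - 1 - (i : Int)).toNat)
  else 0

def pvF (number : Int) (N : Nat) (offset length : Int) (m : Nat) : Int :=
  ∑ i ∈ Finset.range m, pvTerm number N offset length i

lemma pv_nat_and_two_pow (m k : Nat) : m &&& 2 ^ k = (m / 2 ^ k % 2) * 2 ^ k := by
  rw [Nat.and_two_pow]
  have h : m.testBit k = decide (m / 2 ^ k % 2 = 1) := by
    simp [Nat.testBit, Nat.shiftRight_eq_div_pow]
    exact Bool.beq_eq_decide_eq _ 1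
  rw [h]
  by_cases h1 : m / 2 ^ k % 2 = 1 <;> simp [h1] <;> omega

lemma pv_neg_ediv (m : Nat) (P : Int) (hP : 0 < P) :
    (-(m : Int) - 1) / P = -((m : Int) / P) - 1 := by
  have h0 : P * ((m : Int) / P) + (m : Int) % P = m := Int.ediv_add_emod _ _
  have hr0 : 0 ≤ (m : Int) % P := Int.emod_nonneg _ (by omega)
  have hrP : (m : Int) % P < P := Int.emod_lt_of_pos _ hP
  have key : -(m : Int) - 1 = (P - 1 - (m : Int) % P) + P * (-((m : Int) / P) - 1) := by
    linear_combination h0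
  rw [key, Int.add_mul_ediv_left _ _ (by omega), Int.ediv_eq_zero_of_lt (by omega) (by omega)]
  ring

lemma pv_neg_emod (a P : Int) (hP : 0 < P) : (-a - 1) % P = P - 1 - a % P := by
  have h0 : P * (a / P) + a % P = a := Int.ediv_add_emod _ _
  have hr0 : 0 ≤ a % P := Int.emod_nonneg _ (by omega)
  have hrP : a % P < P := Int.emod_lt_of_pos _ hP
  have key : -a - 1 = (P - 1 - a % P) + P * (-(a / P) - 1) := by linear_combination h0
  rw [key, Int.add_mul_emod_self_left, Int.emod_eq_of_lt (by omega) (by omega)]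

lemma pv_band_two_pow (a : Int) (k : Nat) :
    PySem.Int.band a (2 ^ k) = (a / 2 ^ k % 2) * 2 ^ k := by
  have hcast : ((2 ^ k : Nat) : Int) = 2 ^ k := by push_cast; ring
  by_cases ha : 0 ≤ a
  · rw [← hcast, PySem.Int.band_of_nonneg ha (by positivity), Int.toNat_natCast,
      pv_nat_and_two_pow]
    have h2 : a = (a.toNat : Int) := (Int.toNat_of_nonneg ha).symm
    rw [h2]
    push_cast [Int.natCast_ediv, Int.natCast_emod]
    simp
  · rw [← hcast]
    unfold PySem.Int.band
    rw [if_neg ha, if_pos (by positivity), Int.toNat_natCast]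
    set m : Nat := (-a - 1).toNat with hm
    have hma : (m : Int) = -a - 1 := by omega
    rw [Nat.land_comm, pv_nat_and_two_pow]
    set d : Nat := m / 2 ^ k % 2 with hd
    have hd1 : d ≤ 1 := by omega
    have hsub : d * 2 ^ k ≤ 2 ^ k := by
      calc d * 2 ^ k ≤ 1 * 2 ^ k := Nat.mul_le_mul_right _ hd1
      _ = 2 ^ k := by ring
    rw [Int.ofNat_sub hsub, hcast]
    have ha' : a = -(m : Int) - 1 := by omega
    have hq : a / 2 ^ k = -((m : Int) / 2 ^ k) - 1 := by
      rw [ha', ← hcast]; exact pv_neg_ediv m _ (by positivity)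
    have hQ : ((d : Nat) : Int) = (m : Int) / ((2 : Int) ^ k) % 2 := by
      rw [hd]; push_cast [Int.natCast_ediv, Int.natCast_emod]; ring
    have heq : a / 2 ^ k % 2 = 1 - (d : Int) := by
      rw [hq]; omega
    rw [heq]
    push_cast
    ring

-- Python's  a & ((1 << L) - 1)  is  a mod 2^L, for EVERY int a (two's complement).
lemma pv_band_mask (a : Int) (L : Nat) : PySem.Int.band a (2 ^ L - 1) = a % 2 ^ L := by
  have hP : (0 : Int) < 2 ^ L := by positivity
  have hcast : (((2 ^ L - 1 : Nat)) : Int) = 2 ^ L - 1 := by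
    have : (1 : Nat) ≤ 2 ^ L := Nat.one_le_two_pow
    push_cast [this]; ring
  by_cases ha : 0 ≤ a
  · rw [PySem.Int.band_of_nonneg ha (by omega)]
    have h1 : (2 ^ L - 1 : Int).toNat = 2 ^ L - 1 := by omega
    rw [h1, Nat.and_two_pow_sub_one_eq_mod]
    have h2 : a = (a.toNat : Int) := (Int.toNat_of_nonneg ha).symm
    rw [h2]
    push_cast [Int.natCast_emod]
    simp
  · unfold PySem.Int.band
    rw [if_neg ha, if_pos (by omega)]
    set m : Nat := (-a - 1).toNat with hm
    have hma : (m : Int) = -a - 1 := by omega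
    have h1 : (2 ^ L - 1 : Int).toNat = 2 ^ L - 1 := by omega
    rw [h1, Nat.and_comm, Nat.and_two_pow_sub_one_eq_mod]
    have hsub : m % 2 ^ L ≤ 2 ^ L - 1 := by
      have := Nat.mod_lt m (Nat.two_pow_pos L)
      omega
    rw [Int.ofNat_sub hsub, hcast]
    have hmm : ((m % 2 ^ L : Nat) : Int) = (-a - 1) % 2 ^ L := by
      push_cast [Int.natCast_emod, hma]; ring_nf
    rw [hmm, pv_neg_emod a _ hP]
    ring

lemma pv_nat_lor_disjoint (c p : Nat) : (2 ^ (p + 1) * c) ||| 2 ^ p = 2 ^ (p + 1) * c + 2 ^ p := by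
  have hrw : 2 ^ (p + 1) * c + 2 ^ p = 2 ^ p * (2 * c + 1) := by ring
  rw [hrw]
  apply Nat.eq_of_testBit_eq
  intro j
  rw [Nat.testBit_lor, Nat.testBit_two_pow_mul, Nat.testBit_two_pow_mul, Nat.testBit_two_pow]
  rcases lt_trichotomy j p with h | h | h
  · have a1 : ¬ (j ≥ p + 1) := by omega
    have a2 : ¬ (j ≥ p) := by omega
    have a3 : ¬ (p = j) := by omega
    simp [a1, a2, a3]
  · subst h
    have a1 : ¬ (j ≥ j + 1) := by omega
    simp [a1, Nat.testBit_zero]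
  · have a1 : j ≥ p + 1 := h
    have a2 : j ≥ p := by omega
    have a3 : ¬ (p = j) := by omega
    simp [a1, a2, a3]
    rw [show j - p = (j - p - 1) + 1 by omega, Nat.testBit_succ,
      show (2 * c + 1) / 2 = c by omega, Nat.sub_sub]

lemma pv_bor_disjoint (x : Int) (p : Nat) (hx : 0 ≤ x) (hd : (2 : Int) ^ (p + 1) ∣ x) :
    PySem.Int.bor x (2 ^ p) = x + 2 ^ p := by
  obtain ⟨c, hc⟩ := hd
  have hc0 : 0 ≤ c := by
    by_cases h : 0 ≤ c
    · exact h
    · exfalso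
      rw [Int.not_le] at h
      have : x < 0 := by
        rw [hc]
        exact mul_neg_of_pos_of_neg (by positivity) h
      omega
  have hx' : x = ((2 ^ (p + 1) * c.toNat : Nat) : Int) := by
    rw [hc]; push_cast; rw [Int.toNat_of_nonneg hc0]
  have hp' : ((2 : Int) ^ p) = ((2 ^ p : Nat) : Int) := by push_cast; ring
  rw [hx', hp', PySem.Int.bor_of_nonneg (by positivity) (by positivity),
    Int.toNat_natCast, Int.toNat_natCast, pv_nat_lor_disjoint]
  push_cast
  ring

lemma pv_digits (y : Int) (k : Nat) :
    ∑ j ∈ Finset.range k, (y / 2 ^ j % 2) * 2 ^ j = y % 2 ^ k := by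
  induction k with
  | zero => simp
  | succ k ih =>
    rw [Finset.sum_range_succ, ih]
    set P : Int := 2 ^ k with hP
    have hP0 : 0 < P := by positivity
    have h0 : P * (y / P) + y % P = y := Int.ediv_add_emod _ _
    have hr0 : 0 ≤ y % P := Int.emod_nonneg _ (by omega)
    have hrP : y % P < P := Int.emod_lt_of_pos _ hP0
    set q : Int := y / P with hq
    have hs : q % 2 = 0 ∨ q % 2 = 1 := by omega
    have hqd : 2 * (q / 2) + q % 2 = q := by omega
    have hkey : y = (q % 2 * P + y % P) + (2 * P) * (q / 2) := by
      linear_combination -h0 - P * hqd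
    have hnn : 0 ≤ q % 2 * P + y % P := by rcases hs with h | h <;> rw [h] <;> linarith
    have hlt : q % 2 * P + y % P < 2 * P := by rcases hs with h | h <;> rw [h] <;> linarith
    have hmod : y % (2 * P) = q % 2 * P + y % P := by
      conv_lhs => rw [hkey]
      rw [Int.add_mul_emod_self_left, Int.emod_eq_of_lt hnn hlt]
    have hpow : (2 : Int) ^ (k + 1) = 2 * P := by rw [hP]; ring
    rw [hpow, hmod]
    ring

lemma pvTerm_nonneg (number : Int) (N : Nat) (offset length : Int) (i : Nat) :
    0 ≤ pvTerm number N offset length i := by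
  unfold pvTerm
  split
  · exact mul_nonneg (Int.emod_nonneg _ (by norm_num)) (by positivity)
  · exact le_refl 0

lemma pvF_nonneg (number : Int) (N : Nat) (offset length : Int) (m : Nat) :
    0 ≤ pvF number N offset length m :=
  Finset.sum_nonneg fun i _ => pvTerm_nonneg number N offset length i

lemma pvF_dvd (number : Int) (N : Nat) (offset length : Int) (m : Nat)
    (hw : offset ≤ (m : Int) ∧ (m : Int) < offset + length) :
    (2 : Int) ^ ((offset + length - 1 - (m : Int)).toNat + 1) ∣ pvF number N offset length m := by
  apply Finset.dvd_sum
  intro i hi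
  rw [Finset.mem_range] at hi
  unfold pvTerm
  split
  · rename_i hwi
    apply Dvd.dvd.mul_left
    apply pow_dvd_pow
    omega
  · exact dvd_zero _

lemma pv_loop (number : Int) (N : Nat) (offset length : Int) :
    (PySem.List.pyRange 0 (N : Int) 1).foldl (fun bits i =>
      if ¬ (offset ≤ i ∧ i < offset + length) then bits
      else
        let bit_set : Int := PySem.Int.band number ((1 : Int) <<< (((N : Int)) - 1 - i).toNat)
        if bit_set ≠ 0 then
          PySem.Int.bor bits ((1 : Int) <<< (offset + length - 1 - i).toNat)
        else bits) 0 = pvF number N offset length N := by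
  suffices h : ∀ m : Nat, m ≤ N →
      (PySem.List.pyRange 0 (m : Int) 1).foldl (fun bits i =>
        if ¬ (offset ≤ i ∧ i < offset + length) then bits
        else
          let bit_set : Int := PySem.Int.band number ((1 : Int) <<< (((N : Int)) - 1 - i).toNat)
          if bit_set ≠ 0 then
            PySem.Int.bor bits ((1 : Int) <<< (offset + length - 1 - i).toNat)
          else bits) 0 = pvF number N offset length m by
    exact h N (le_refl N)
  intro m hm
  induction m with
  | zero => simp [pvF]
  | succ m ih =>
    have hm' : m ≤ N := by omega
    have hstep : ((m : Nat) : Int) + 1 = (((m + 1 : Nat)) : Int) := by push_cast; ring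
    rw [← hstep, PySem.List.pyRange_one_succ_right (by positivity), List.foldl_append,
      ih hm']
    show (if ¬ (offset ≤ (m : Int) ∧ (m : Int) < offset + length) then pvF number N offset length m
      else
        if PySem.Int.band number ((1 : Int) <<< (((N : Int)) - 1 - (m : Int)).toNat) ≠ 0 then
          PySem.Int.bor (pvF number N offset length m) ((1 : Int) <<< (offset + length - 1 - (m : Int)).toNat)
        else pvF number N offset length m) = pvF number N offset length (m + 1)
    have hsum : pvF number N offset length (m + 1)
        = pvF number N offset length m + pvTerm number N offset length m := by
      unfold pvF; rw [Finset.sum_range_succ]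
    rw [hsum]
    by_cases hw : offset ≤ (m : Int) ∧ (m : Int) < offset + length
    · rw [if_neg (by simpa using hw)]
      have hN : (((N : Int)) - 1 - (m : Int)).toNat = N - 1 - m := by omega
      rw [hN, Int.shiftLeft_eq, Int.shiftLeft_eq, one_mul, one_mul, pv_band_two_pow]
      set b : Int := number / 2 ^ (N - 1 - m) % 2 with hb
      have hb01 : b = 0 ∨ b = 1 := by omega
      rcases hb01 with h1 | h1
      · rw [h1, if_neg (by simp)]
        unfold pvTerm
        rw [if_pos hw, ← hb, h1]
        ring
      · rw [h1, if_pos (by positivity)]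
        rw [pv_bor_disjoint _ _ (pvF_nonneg _ _ _ _ _) (pvF_dvd number N offset length m hw)]
        unfold pvTerm
        rw [if_pos hw, ← hb, h1]
        ring
    · rw [if_pos (by simpa using hw)]
      unfold pvTerm
      rw [if_neg hw]
      ring

lemma pv_closed (number : Int) (N : Nat) (offset length : Int) :
    pvF number N offset length N =
      if min (offset + length) (N : Int) ≤ max offset 0 then 0
      else number / 2 ^ (((N : Int) - min (offset + length) (N : Int)).toNat)
             % 2 ^ ((min (offset + length) (N : Int) - max offset 0).toNat)
             * 2 ^ ((offset + length - min (offset + length) (N : Int)).toNat) := by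
  set lo : Int := max offset 0 with hlo
  set hi : Int := min (offset + length) (N : Int) with hhi
  by_cases hempty : hi ≤ lo
  · rw [if_pos hempty]
    apply Finset.sum_eq_zero
    intro i hi'
    rw [Finset.mem_range] at hi'
    unfold pvTerm
    rw [if_neg]
    omega
  · rw [if_neg hempty]
    have hlo0 : 0 ≤ lo := by omega
    set a : Nat := lo.toNat with ha
    set b : Nat := hi.toNat with hb
    have hab : a < b := by omega
    have hbN : b ≤ N := by omega
    have haI : (a : Int) = lo := by omega
    have hbI : (b : Int) = hi := by omega
    set E : Nat := (offset + length - hi).toNat with hE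
    have hEI : (E : Int) = offset + length - hi := by omega
    have h1 : pvF number N offset length N = ∑ i ∈ Finset.Ico a b, pvTerm number N offset length i := by
      unfold pvF
      rw [Finset.range_eq_Ico]
      refine (Finset.sum_subset (Finset.Ico_subset_Ico (by omega) (by omega)) ?_).symm
      intro i hiN hiab
      rw [Finset.mem_Ico] at hiN hiab
      unfold pvTerm
      rw [if_neg]
      omega
    rw [h1]
    have h2 : ∀ i ∈ Finset.Ico a b, pvTerm number N offset length i
        = (number / 2 ^ (N - 1 - i) % 2) * 2 ^ (E + (b - 1 - i)) := by
      intro i hi'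
      rw [Finset.mem_Ico] at hi'
      unfold pvTerm
      rw [if_pos (by omega)]
      congr 2
      omega
    rw [Finset.sum_congr rfl h2]
    rw [Finset.sum_Ico_eq_sum_range]
    have h3 : ∀ j, j < b - a → (fun j => (number / 2 ^ (N - 1 - (a + j)) % 2) * 2 ^ (E + (b - 1 - (a + j)))) ((b - a) - 1 - j)
        = ((number / 2 ^ (N - b)) / 2 ^ j % 2) * 2 ^ j * 2 ^ E := by
      intro j hj
      have e1 : N - 1 - (a + ((b - a) - 1 - j)) = (N - b) + j := by omega
      have e2 : b - 1 - (a + ((b - a) - 1 - j)) = j := by omega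
      simp only [e1, e2]
      rw [pow_add, ← Int.ediv_ediv_of_nonneg (by positivity), pow_add]
      ring
    rw [← Finset.sum_range_reflect]
    rw [Finset.sum_congr rfl (fun j hj => h3 j (Finset.mem_range.mp hj))]
    rw [← Finset.sum_mul, pv_digits]
    have e4 : ((N : Int) - hi).toNat = N - b := by omega
    have e5 : (hi - lo).toNat = b - a := by omega
    rw [e4, e5]

-- bits below index N are unchanged by reducing mod 2^N
lemma pv_mod_high (a : Int) (N k j : Nat) (h : k + j ≤ N) :
    (a % 2 ^ N) / 2 ^ k % 2 ^ j = a / 2 ^ k % 2 ^ j := by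
  have h0 : a % 2 ^ N = a - 2 ^ N * (a / 2 ^ N) := by
    have := Int.ediv_add_emod a (2 ^ N)
    linarith
  rw [h0]
  have hNk : (2 : Int) ^ N = 2 ^ k * 2 ^ (N - k) := by
    rw [← pow_add]; congr 1; omega
  have h1 : a - 2 ^ N * (a / 2 ^ N) = a + 2 ^ k * (-(2 ^ (N - k) * (a / 2 ^ N))) := by
    rw [hNk]; ring
  rw [h1, Int.add_mul_ediv_left _ _ (by positivity)]
  have h2 : (2 : Int) ^ (N - k) = 2 ^ j * 2 ^ (N - k - j) := by
    rw [← pow_add]; congr 1; omega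
  have h3 : a / 2 ^ k + -(2 ^ (N - k) * (a / 2 ^ N))
      = a / 2 ^ k + 2 ^ j * (-(2 ^ (N - k - j) * (a / 2 ^ N))) := by
    rw [h2]; ring
  rw [h3, Int.add_mul_emod_self_left]

-- The arithmetic heart: A's clamped window (from pv_closed) equals B's shift-and-mask,
-- for any 0 ≤ m < 2^N and positive length.
lemma pv_window_eq_shift_mask (m : Int) (N : Nat) (offset length : Int)
    (hlen : 0 < length) (hm0 : 0 ≤ m) (hmN : m < 2 ^ N) :
    (if min (offset + length) (N : Int) ≤ max offset 0 then 0
      else m / 2 ^ (((N : Int) - min (offset + length) (N : Int)).toNat)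
             % 2 ^ ((min (offset + length) (N : Int) - max offset 0).toNat)
             * 2 ^ ((offset + length - min (offset + length) (N : Int)).toNat))
    = (if 0 ≤ (N : Int) - (offset + length) then m / 2 ^ (((N : Int) - (offset + length)).toNat)
        else m * 2 ^ ((offset + length - (N : Int)).toNat)) % 2 ^ length.toNat := by
  set lo : Int := max offset 0 with hlo
  set hi : Int := min (offset + length) (N : Int) with hhi
  by_cases hs : 0 ≤ (N : Int) - (offset + length)
  · -- window ends inside the data (or before it): a right shift
    rw [if_pos hs]
    set k : Nat := ((N : Int) - (offset + length)).toNat with hk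
    have hkI : (k : Int) = (N : Int) - (offset + length) := by omega
    by_cases hempty : hi ≤ lo
    · -- empty window: offset + length ≤ 0 (then the shift clears everything) — note N ≤ offset
      -- is impossible here since offset + length ≤ N
      rw [if_pos hempty]
      have hcase : offset + length ≤ 0 := by omega
      have hNk : N ≤ k := by omega
      have : m / 2 ^ k = 0 := by
        apply Int.ediv_eq_zero_of_lt hm0
        calc m < 2 ^ N := hmN
        _ ≤ 2 ^ k := by apply pow_le_pow_right₀ (by norm_num) hNk
      rw [this]
      simp
    · rw [if_neg hempty]
      have hhiE : hi = offset + length := by omega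
      have hE0 : (offset + length - hi).toNat = 0 := by omega
      have hNhi : ((N : Int) - hi).toNat = k := by omega
      rw [hhiE] at hE0 hNhi ⊢
      rw [hE0, hNhi, pow_zero, mul_one]
      -- goal: m / 2^k % 2^((offset+length-lo).toNat) = m / 2^k % 2^length.toNat
      have hq0 : 0 ≤ m / 2 ^ k := Int.ediv_nonneg hm0 (by positivity)
      by_cases hoff : 0 ≤ offset
      · have : (offset + length - lo).toNat = length.toNat := by omega
        rw [this]
      · -- offset < 0: the quotient is < 2^(offset+length) ≤ both moduli
        have hql : m / 2 ^ k < 2 ^ (offset + length).toNat := by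
          rw [Int.ediv_lt_iff_lt_mul (by positivity), ← pow_add]
          calc m < 2 ^ N := hmN
          _ ≤ 2 ^ ((offset + length).toNat + k) := by
                apply pow_le_pow_right₀ (by norm_num); omega
        have hlo0 : lo = 0 := by omega
        have h1 : (offset + length - lo).toNat = (offset + length).toNat := by omega
        rw [h1, Int.emod_eq_of_lt hq0 hql, Int.emod_eq_of_lt hq0]
        calc m / 2 ^ k < 2 ^ (offset + length).toNat := hql
        _ ≤ 2 ^ length.toNat := by apply pow_le_pow_right₀ (by norm_num); omega
  · -- window runs past the data: a left shift
    rw [if_neg hs]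
    set E : Nat := (offset + length - (N : Int)).toNat with hE
    have hEI : (E : Int) = offset + length - (N : Int) := by omega
    have hEle : E ≤ length.toNat ∨ (N : Int) ≤ offset := by omega
    by_cases hempty : hi ≤ lo
    · -- empty window: N ≤ offset (offset + length ≤ 0 is impossible since N < offset + length)
      rw [if_pos hempty]
      by_cases hoff : 0 ≤ offset
      · -- N ≤ offset here, so the whole shifted field is a multiple of 2^length
        have hdvd : (2 : Int) ^ length.toNat ∣ m * 2 ^ E := by
          apply Dvd.dvd.mul_left
          apply pow_dvd_pow
          omega
        exact (Int.emod_eq_zero_of_dvd hdvd).symm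
      · -- offset < 0 forces N = 0 here, so m = 0
        have hN0 : N = 0 := by omega
        have hm00 : m = 0 := by rw [hN0] at hmN; omega
        simp [hm00]
    · rw [if_neg hempty]
      have hhiN : hi = (N : Int) := by omega
      have hoffN : offset < (N : Int) := by omega
      rw [hhiN]
      have h0 : ((N : Int) - (N : Int)).toNat = 0 := by omega
      rw [h0, pow_zero, Int.ediv_one]
      have hEe : (offset + length - (N : Int)).toNat = E := rfl
      rw [hEe]
      by_cases hoff : 0 ≤ offset
      · -- ((N - offset).toNat-bit low part of m) shifted by E; length = (N - offset) + E here
        have hW : ((N : Int) - lo).toNat + E = length.toNat := by omega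
        have hsplit : (2 : Int) ^ length.toNat = 2 ^ ((N : Int) - lo).toNat * 2 ^ E := by
          rw [← pow_add, hW]
        rw [hsplit, mul_comm ((2:Int) ^ (((N : Int) - lo).toNat)) (2 ^ E),
          mul_comm m (2 ^ E), Int.mul_emod_mul_of_pos _ _ (by positivity)]
        ring
      · -- offset < 0: everything fits below 2^length, both sides are m * 2^E
        have hlo0 : lo = 0 := by omega
        have hNlo : ((N : Int) - lo).toNat = N := by omega
        rw [hlo0] at hNlo ⊢
        have hlt : m * 2 ^ E < 2 ^ length.toNat := by
          calc m * 2 ^ E < 2 ^ N * 2 ^ E := by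
                apply mul_lt_mul_of_pos_right hmN (by positivity)
          _ = 2 ^ (N + E) := by rw [pow_add]
          _ ≤ 2 ^ length.toNat := by apply pow_le_pow_right₀ (by norm_num); omega
        rw [hNlo, Int.emod_eq_of_lt hm0 hmN,
          Int.emod_eq_of_lt (mul_nonneg hm0 (by positivity)) hlt]

-- ===== VERDICT (by name: the statement is the Claim_ definition above) =====
theorem extract_bit_field_be_spec : Claim_equal_extract_bit_field_be := by
  intro data offset length _hdom hpre
  unfold Pre_extract_bit_field_be at hpre
  obtain ⟨number, hnum⟩ := Option.isSome_iff_exists.mp hpre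
  unfold Spec_extract_bit_field_be
  simp only [extract_bit_field_be, extract_bit_field_be_alt, hnum]
  have hL : PySem.Str.len data = ((data.toList.length : Nat) : Int) := PySem.Str.len_eq data
  set L : Nat := data.toList.length with hLdef
  have hbc : PySem.Int.floordiv (PySem.Str.len data * 8) 2 = ((4 * L : Nat) : Int) := by
    rw [hL, PySem.Int.floordiv_eq_ediv_of_pos (by norm_num)]
    push_cast
    omega
  have hn : PySem.Str.len data * 4 = ((4 * L : Nat) : Int) := by rw [hL]; push_cast; ring
  simp only [hbc, hn]
  set N : Nat := 4 * L with hN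
  rw [pv_loop number N offset length, pv_closed]
  -- B side: the masked value is number mod 2^N
  have htN : (((N : Nat) : Int)).toNat = N := by omega
  rw [htN, Int.shiftLeft_eq, one_mul, pv_band_mask]
  set m : Int := number % 2 ^ N with hm
  have hm0 : 0 ≤ m := Int.emod_nonneg _ (by positivity)
  have hmN : m < 2 ^ N := Int.emod_lt_of_pos _ (by positivity)
  by_cases hlen : length ≤ 0
  · -- empty field: both sides are 0
    rw [if_pos hlen, if_pos (by omega)]
  · rw [if_neg hlen]
    push_neg at hlen
    -- rewrite A's closed form over number into the same form over m
    have hA : (if min (offset + length) ((N : Nat) : Int) ≤ max offset 0 then 0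
        else number / 2 ^ ((((N : Nat) : Int) - min (offset + length) ((N : Nat) : Int)).toNat)
               % 2 ^ ((min (offset + length) ((N : Nat) : Int) - max offset 0).toNat)
               * 2 ^ ((offset + length - min (offset + length) ((N : Nat) : Int)).toNat))
        = (if min (offset + length) ((N : Nat) : Int) ≤ max offset 0 then 0
        else m / 2 ^ ((((N : Nat) : Int) - min (offset + length) ((N : Nat) : Int)).toNat)
               % 2 ^ ((min (offset + length) ((N : Nat) : Int) - max offset 0).toNat)
               * 2 ^ ((offset + length - min (offset + length) ((N : Nat) : Int)).toNat)) := by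
      by_cases hempty : min (offset + length) ((N : Nat) : Int) ≤ max offset 0
      · rw [if_pos hempty, if_pos hempty]
      · rw [if_neg hempty, if_neg hempty, hm,
          pv_mod_high number N _ _ (by omega)]
    rw [hA, pv_window_eq_shift_mask m N offset length hlen hm0 hmN]
    -- finally align B's shift expression with the lemma's right-hand side
    rw [show ((1 : Int) <<< length.toNat) - 1 = 2 ^ length.toNat - 1 from by
        rw [Int.shiftLeft_eq, one_mul], pv_band_mask]
    by_cases hsh : 0 ≤ ((N : Nat) : Int) - (offset + length)
    · rw [if_pos hsh, if_pos hsh, Int.shiftRight_eq_div_pow]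
      norm_cast
    · rw [if_neg hsh, if_neg hsh, Int.shiftLeft_eq]
      congr 3
      omega
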